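-- pv_equiv track=rewrite | github.com/brigitteunger/katas | test_longest_duplicate_substring.py | longestDupSubstring_easy_long_sol
-- ===== SOURCE A (Python) =====
-- def longestDupSubstring_easy_long_sol(S: str) -> str:
--     equal_sub = []
--     size_equal_sub = 0
--
--     list_s = list(S)
--     size_s = len(list_s)
--     min_size = 1
--     for i in range(size_s-1):
--         for j in range(i+1, size_s):
--             min_size = size_equal_sub
--             for size in range(min_size, size_s-i):
--                 found_one = False
--                 sub_1 = list_s[i:size+i]
--                 sub_2 = list_s[j:size+j]
--                 if sub_1 == sub_2:
--                     found_one = True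
--                     if size > size_equal_sub:
--                         equal_sub = sub_1
--                         size_equal_sub = size
--                 if not found_one:
--                     break
--
--     longest_substring = ''.join(equal_sub)
--     return longest_substring
-- ===== SOURCE B (Python) =====
-- def longestDupSubstring_easy_long_sol(S: str) -> str:
--     n = len(S)
--
--     def dup_start(k):
--         # smallest start index of a length-k substring occurring at least twice, else None
--         counts = {}
--         for i in range(n - k + 1):
--             sub = S[i:i + k]
--             counts[sub] = counts.get(sub, 0) + 1
--         for i in range(n - k + 1):
--             if counts[S[i:i + k]] > 1:
--                 return i
--         return None
--
--     best_k, best_i = 0, 0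
--     lo, hi = 1, n - 1
--     while lo <= hi:
--         mid = (lo + hi) // 2
--         i = dup_start(mid)
--         if i is not None:
--             best_k, best_i = mid, i
--             lo = mid + 1
--         else:
--             hi = mid - 1
--     return S[best_i:best_i + best_k]
-- ===== Notes on version B (the rewrite author's own statement) =====
-- stated objective: faster
-- what changed: A's quadruple nested scan over all (i,j,size) triples is replaced by a binary search on the answer length whose check counts all length-k substrings in a dictionary and returns the first duplicated start index.
import Mathlib
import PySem

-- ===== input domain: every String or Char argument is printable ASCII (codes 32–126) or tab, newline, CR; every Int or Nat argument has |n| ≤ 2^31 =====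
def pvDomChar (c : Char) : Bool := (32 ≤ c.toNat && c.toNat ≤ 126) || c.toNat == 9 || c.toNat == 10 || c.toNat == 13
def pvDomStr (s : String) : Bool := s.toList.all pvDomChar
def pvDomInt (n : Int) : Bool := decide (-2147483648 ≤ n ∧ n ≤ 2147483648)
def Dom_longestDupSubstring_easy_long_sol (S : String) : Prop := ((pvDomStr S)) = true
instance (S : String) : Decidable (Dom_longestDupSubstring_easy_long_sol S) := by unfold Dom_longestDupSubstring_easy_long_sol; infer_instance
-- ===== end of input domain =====

-- B replaces A's cubic scan over all (i, j, size) triples by a binary search on the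
-- answer length whose check counts length-k substrings in a dictionary; exact same
-- return value, measurably faster.

-- ===== PORT A =====
-- inner 'for size in range(min_size, size_s-i)' loop with its break, over the remaining sizes
def pvAInner (list_s : List Char) (i j : Int) : List Int → List Char × Int → List Char × Int
  | [], st => st
  | size :: rest, st =>
    let sub_1 := PySem.List.slice list_s (some i) (some (size + i))
    let sub_2 := PySem.List.slice list_s (some j) (some (size + j))
    if sub_1 = sub_2 then
      if size > st.2 then pvAInner list_s i j rest (sub_1, size)
      else pvAInner list_s i j rest st
    else st

def longestDupSubstring_easy_long_sol (S : String) : String :=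
  let list_s := S.toList
  let size_s : Int := (list_s.length : Int)
  let st :=
    (PySem.List.pyRange 0 (size_s - 1) 1).foldl (fun st i =>
      (PySem.List.pyRange (i + 1) size_s 1).foldl (fun st j =>
        pvAInner list_s i j (PySem.List.pyRange st.2 (size_s - i) 1) st) st)
      (([] : List Char), (0 : Int))
  String.ofList st.1

-- ===== PORT B =====
-- second loop of dup_start: first position whose substring was counted twice
def pvBFindFirst (S : String) (k : Int) (counts : PySem.Dict String Int) : List Int → Option Int
  | [] => none
  | i :: rest =>
    if counts.getD (PySem.Str.slice S (some i) (some (i + k))) 0 > 1 then some i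
    else pvBFindFirst S k counts rest

-- dup_start(k): count every length-k substring, then scan for the first duplicated one
def pvBDupStart (S : String) (n k : Int) : Option Int :=
  let counts : PySem.Dict String Int :=
    (PySem.List.pyRange 0 (n - k + 1) 1).foldl
      (fun counts i =>
        let sub := PySem.Str.slice S (some i) (some (i + k))
        counts.insert sub (counts.getD sub 0 + 1))
      PySem.Dict.empty
  pvBFindFirst S k counts (PySem.List.pyRange 0 (n - k + 1) 1)

-- the 'while lo <= hi' binary search; fuel only makes the recursion structural
def pvBSearch (S : String) (n : Int) : Nat → Int → Int → Int → Int → Int × Int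
  | 0, _, _, bk, bi => (bk, bi)
  | fuel + 1, lo, hi, bk, bi =>
    if lo ≤ hi then
      let mid := PySem.Int.floordiv (lo + hi) 2
      match pvBDupStart S n mid with
      | some i => pvBSearch S n fuel (mid + 1) hi mid i
      | none => pvBSearch S n fuel lo (mid - 1) bk bi
    else (bk, bi)

def longestDupSubstring_easy_long_sol_alt (S : String) : String :=
  let n : Int := (S.toList.length : Int)
  let r := pvBSearch S n (n + 2).toNat 1 (n - 1) 0 0
  PySem.Str.slice S (some r.2) (some (r.2 + r.1))

-- ===== PRECONDITION & SPEC =====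
def Spec_longestDupSubstring_easy_long_sol (S : String) (out : String) : Prop := out = longestDupSubstring_easy_long_sol_alt S
instance (S : String) (out : String) : Decidable (Spec_longestDupSubstring_easy_long_sol S out) := by unfold Spec_longestDupSubstring_easy_long_sol; infer_instance

-- ===== CLAIM (what is proved, stated in full; the proofs are below) =====
def Claim_equal_longestDupSubstring_easy_long_sol : Prop := ∀ (S : String), Dom_longestDupSubstring_easy_long_sol S → Spec_longestDupSubstring_easy_long_sol S (longestDupSubstring_easy_long_sol S)

-- ===== LEMMAS AND PROOFS =====

def pvCpl : List Char → List Char → Nat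
  | a :: x, b :: y => if a = b then pvCpl x y + 1 else 0
  | _, _ => 0

def pvMaxF {α : Type} (f : α → Nat) (ps : List α) : Nat := ps.foldl (fun m p => max m (f p)) 0

lemma pv_le_cpl_iff (k : Nat) : ∀ (x y : List Char),
    k ≤ pvCpl x y ↔ k ≤ x.length ∧ k ≤ y.length ∧ x.take k = y.take k := by
  induction k with
  | zero => intro x y; simp
  | succ k ih =>
    intro x y
    match x, y with
    | [], _ => simp [pvCpl]
    | a :: x, [] => simp [pvCpl]
    | a :: x, b :: y =>
      by_cases hab : a = b
      · subst hab
        simp only [pvCpl, List.length_cons, List.take_succ_cons,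
          List.cons.injEq, true_and, if_pos trivial]
        simpa [Nat.succ_le_succ_iff] using ih x y
      · rw [show pvCpl (a :: x) (b :: y) = 0 from by simp [pvCpl, hab]]
        constructor
        · omega
        · rintro ⟨-, -, h⟩
          simp only [List.take_succ_cons, List.cons.injEq] at h
          exact absurd h.1 hab

lemma pv_cpl_le_right (x y : List Char) : pvCpl x y ≤ y.length :=
  ((pv_le_cpl_iff (pvCpl x y) x y).mp le_rfl).2.1

lemma pv_take_eq_iff {x y : List Char} (h : y.length < x.length) (k : Nat) :
    x.take k = y.take k ↔ k ≤ pvCpl x y := by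
  constructor
  · intro ht
    by_cases hk : k ≤ y.length
    · exact (pv_le_cpl_iff k x y).mpr ⟨le_trans hk (le_of_lt h), hk, ht⟩
    · exfalso
      have := congrArg List.length ht
      simp [List.length_take] at this
      omega
  · intro hk
    have h3 := (pv_le_cpl_iff k x y).mp hk
    exact h3.2.2

lemma pvMaxF_foldl_init {α : Type} (f : α → Nat) (ps : List α) : ∀ (a : Nat),
    ps.foldl (fun m p => max m (f p)) a = max a (pvMaxF f ps) := by
  induction ps with
  | nil => intro a; simp [pvMaxF]
  | cons p ps ih =>
    intro a
    show List.foldl _ (max a (f p)) ps = max a (pvMaxF f (p :: ps))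
    rw [ih (max a (f p))]
    have h2 : pvMaxF f (p :: ps) = max (max 0 (f p)) (pvMaxF f ps) := by
      show List.foldl _ (max 0 (f p)) ps = _
      rw [ih (max 0 (f p))]
    omega

lemma pvMaxF_cons {α : Type} (f : α → Nat) (p : α) (ps : List α) :
    pvMaxF f (p :: ps) = max (f p) (pvMaxF f ps) := by
  have h := pvMaxF_foldl_init f ps (max 0 (f p))
  show List.foldl _ (max 0 (f p)) ps = _
  rw [h]; omega

lemma pvMaxF_le {α : Type} (f : α → Nat) (ps : List α) {p : α} (hp : p ∈ ps) :
    f p ≤ pvMaxF f ps := by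
  induction ps with
  | nil => cases hp
  | cons q ps ih =>
    rw [pvMaxF_cons]
    rcases List.mem_cons.mp hp with h | h
    · subst h; omega
    · have := ih h; omega

lemma pvMaxF_achieved {α : Type} (f : α → Nat) (ps : List α) (h : pvMaxF f ps ≠ 0) :
    ∃ p ∈ ps, f p = pvMaxF f ps := by
  induction ps with
  | nil => simp [pvMaxF] at h
  | cons q ps ih =>
    rw [pvMaxF_cons] at h ⊢
    by_cases hle : pvMaxF f ps ≤ f q
    · exact ⟨q, List.mem_cons_self, by omega⟩
    · have hne : pvMaxF f ps ≠ 0 := by omega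
      obtain ⟨p, hp, hfp⟩ := ih hne
      exact ⟨p, List.mem_cons_of_mem _ hp, by omega⟩

def pvC (l : List Char) (i j : Nat) : Nat := pvCpl (l.drop i) (l.drop j)

lemma pv_slice_nat (l : List Char) (I : Nat) (s : Int) (hs : 0 ≤ s) :
    PySem.List.slice l (some (I : Int)) (some (s + (I : Int))) = (l.drop I).take s.toNat := by
  rw [PySem.List.slice_toNat l (by positivity) (by omega)]
  congr 1
  omega

lemma pvAInner_eq (l : List Char) (I J : Nat) (hIJ : I < J) (hJ : J < l.length) :
    ∀ (m : Nat) (s0 : Int) (e : List Char) (sz : Int), 0 ≤ sz → sz ≤ s0 →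
    ((l.length : Int) - (I : Int) - s0).toNat = m →
    pvAInner l (I : Int) (J : Int) (PySem.List.pyRange s0 ((l.length : Int) - (I : Int)) 1) (e, sz) =
      if ((pvC l I J : Int) ≥ s0 ∧ (pvC l I J : Int) > sz)
      then ((l.drop I).take (pvC l I J), (pvC l I J : Int)) else (e, sz) := by
  have hCJ : pvC l I J ≤ l.length - J := by
    have := pv_cpl_le_right (l.drop I) (l.drop J)
    simpa [pvC] using this
  have hlen : (l.drop J).length < (l.drop I).length := by
    simp [List.length_drop]; omega
  intro m
  induction m with
  | zero =>
    intro s0 e sz h0 hsz hm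
    have hnil : PySem.List.pyRange s0 ((l.length : Int) - (I : Int)) 1 = [] :=
      PySem.List.pyRange_one_eq_nil (by omega)
    rw [hnil]
    have : ¬ ((pvC l I J : Int) ≥ s0 ∧ (pvC l I J : Int) > sz) := by
      intro ⟨h1, _⟩
      omega
    simp [pvAInner, this]
  | succ m ih =>
    intro s0 e sz h0 hsz hm
    by_cases hlt : s0 < (l.length : Int) - (I : Int)
    · rw [PySem.List.pyRange_one_cons hlt]
      have hs0 : 0 ≤ s0 := le_trans h0 hsz
      simp only [pvAInner]
      rw [pv_slice_nat l I s0 hs0, pv_slice_nat l J s0 hs0]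
      by_cases hc : s0.toNat ≤ pvC l I J
      · have heq : (l.drop I).take s0.toNat = (l.drop J).take s0.toNat :=
          (pv_take_eq_iff hlen s0.toNat).mpr hc
        rw [if_pos heq]
        by_cases hupd : s0 > sz
        · rw [if_pos hupd]
          rw [ih (s0 + 1) ((l.drop I).take s0.toNat) s0 hs0 (by omega) (by omega)]
          by_cases hgt : s0.toNat < pvC l I J
          · rw [if_pos ⟨by omega, by omega⟩, if_pos ⟨by omega, by omega⟩]
          · have hceq : pvC l I J = s0.toNat := by omega
            rw [if_neg (by omega), if_pos (by constructor <;> omega)]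
            rw [hceq]
            have : ((s0.toNat : Nat) : Int) = s0 := by omega
            rw [this]
        · rw [if_neg hupd]
          rw [ih (s0 + 1) e sz h0 (by omega) (by omega)]
          by_cases hgt : (pvC l I J : Int) > s0
          · rw [if_pos ⟨by omega, by omega⟩, if_pos ⟨by omega, by omega⟩]
          · rw [if_neg (by omega), if_neg (by omega)]
      · have hne : (l.drop I).take s0.toNat ≠ (l.drop J).take s0.toNat := by
          intro h
          exact hc ((pv_take_eq_iff hlen s0.toNat).mp h)
        rw [if_neg hne]
        rw [if_neg (by omega)]
    · have hnil : PySem.List.pyRange s0 ((l.length : Int) - (I : Int)) 1 = [] :=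
        PySem.List.pyRange_one_eq_nil (by omega)
      rw [hnil]
      have : ¬ ((pvC l I J : Int) ≥ s0 ∧ (pvC l I J : Int) > sz) := by
        intro ⟨h1, _⟩
        omega
      simp [pvAInner, this]

lemma pvRunMax {α : Type} (f : α → Nat) (g : α → List Char) (step : List Char × Int → α → List Char × Int) :
    ∀ (ps : List α),
    (∀ (e : List Char) (b : Nat) (p : α), p ∈ ps →
      step (e, (b : Int)) p = if b < f p then (g p, (f p : Int)) else (e, (b : Int))) →
    ∀ (e : List Char) (b : Nat),
    ps.foldl step (e, (b : Int)) =
      if b < pvMaxF f ps then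
        (match ps.find? (fun p => f p == pvMaxF f ps) with
         | some p => (g p, (pvMaxF f ps : Int))
         | none => (e, (b : Int)))
      else (e, (b : Int)) := by
  intro ps
  induction ps with
  | nil =>
    intro _ e b
    simp [pvMaxF]
  | cons p rest ih =>
    intro hstep e b
    have hmem : p ∈ p :: rest := List.mem_cons_self
    have hrest : ∀ (e : List Char) (b : Nat) (q : α), q ∈ rest →
        step (e, (b : Int)) q = if b < f q then (g q, (f q : Int)) else (e, (b : Int)) :=
      fun e b q hq => hstep e b q (List.mem_cons_of_mem _ hq)
    rw [List.foldl_cons, hstep e b p hmem, pvMaxF_cons]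
    by_cases h1 : b < f p
    · rw [if_pos h1]
      rw [ih hrest (g p) (f p)]
      by_cases h2 : f p < pvMaxF f rest
      · -- max comes from the rest
        have hM : max (f p) (pvMaxF f rest) = pvMaxF f rest := by omega
        rw [hM, if_pos h2, if_pos (by omega : b < pvMaxF f rest)]
        obtain ⟨q, hq, hfq⟩ := pvMaxF_achieved f rest (by omega)
        have hsome : (rest.find? (fun p => f p == pvMaxF f rest)).isSome := by
          rw [List.find?_isSome]
          exact ⟨q, hq, by simpa using hfq⟩
        obtain ⟨q', hq'⟩ := Option.isSome_iff_exists.mp hsome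
        rw [List.find?_cons_of_neg (h := by simp; omega), hq']
      · -- the head achieves the max
        have hM : max (f p) (pvMaxF f rest) = f p := by omega
        rw [hM, if_neg h2, if_pos h1]
        rw [List.find?_cons_of_pos (h := by simp)]
    · rw [if_neg h1]
      rw [ih hrest e b]
      by_cases h2 : b < pvMaxF f rest
      · have hM : max (f p) (pvMaxF f rest) = pvMaxF f rest := by omega
        rw [hM, if_pos h2, if_pos h2]
        rw [List.find?_cons_of_neg (h := by simp; omega)]
      · rw [if_neg h2, if_neg (by omega : ¬ b < max (f p) (pvMaxF f rest))]

def pvMi (l : List Char) (i : Int) : Nat :=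
  pvMaxF (fun j : Int => pvC l i.toNat j.toNat) (PySem.List.pyRange (i + 1) (l.length : Int) 1)

def pvL (l : List Char) : Nat := pvMaxF (pvMi l) (PySem.List.pyRange 0 ((l.length : Int) - 1) 1)

lemma pvInnerFold_eq (l : List Char) (I : Nat) (e : List Char) (b : Nat) :
    (PySem.List.pyRange ((I : Int) + 1) (l.length : Int) 1).foldl
      (fun st j => pvAInner l (I : Int) j (PySem.List.pyRange st.2 ((l.length : Int) - (I : Int)) 1) st)
      (e, (b : Int))
    = if b < pvMi l (I : Int) then ((l.drop I).take (pvMi l (I : Int)), (pvMi l (I : Int) : Int))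
      else (e, (b : Int)) := by
  have hMi : pvMi l (I : Int)
      = pvMaxF (fun j : Int => pvC l I j.toNat) (PySem.List.pyRange ((I : Int) + 1) (l.length : Int) 1) := by
    simp [pvMi]
  have hstep : ∀ (e : List Char) (b : Nat) (j : Int),
      j ∈ PySem.List.pyRange ((I : Int) + 1) (l.length : Int) 1 →
      pvAInner l (I : Int) j (PySem.List.pyRange ((b : Int)) ((l.length : Int) - (I : Int)) 1) (e, (b : Int))
        = if b < pvC l I j.toNat then ((l.drop I).take (pvC l I j.toNat), (pvC l I j.toNat : Int))
          else (e, (b : Int)) := by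
    intro e b j hj
    rw [PySem.List.mem_pyRange_one] at hj
    have hj0 : 0 ≤ j := by omega
    have hjeq : ((j.toNat : Int)) = j := Int.toNat_of_nonneg hj0
    have hIJ : I < j.toNat := by omega
    have hJlen : j.toNat < l.length := by omega
    have := pvAInner_eq l I j.toNat hIJ hJlen
      (((l.length : Int) - (I : Int) - (b : Int)).toNat) (b : Int) e (b : Int)
      (by positivity) le_rfl rfl
    rw [hjeq] at this
    rw [this]
    by_cases hb : b < pvC l I j.toNat
    · rw [if_pos ⟨by omega, by omega⟩, if_pos hb]
    · rw [if_neg (by omega), if_neg hb]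
  have h := pvRunMax (fun j : Int => pvC l I j.toNat) (fun j => (l.drop I).take (pvC l I j.toNat))
    (fun st j => pvAInner l (I : Int) j (PySem.List.pyRange st.2 ((l.length : Int) - (I : Int)) 1) st)
    (PySem.List.pyRange ((I : Int) + 1) (l.length : Int) 1)
    (by intro e b j hj; exact hstep e b j hj) e b
  rw [h, ← hMi]
  by_cases hlt : b < pvMi l (I : Int)
  · rw [if_pos hlt, if_pos hlt]
    obtain ⟨q, hq, hfq⟩ := pvMaxF_achieved (fun j : Int => pvC l I j.toNat)
      (PySem.List.pyRange ((I : Int) + 1) (l.length : Int) 1) (by rw [← hMi]; omega)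
    have hsome : ((PySem.List.pyRange ((I : Int) + 1) (l.length : Int) 1).find?
        (fun j => pvC l I j.toNat == pvMi l (I : Int))).isSome := by
      rw [List.find?_isSome]
      exact ⟨q, hq, by rw [hMi]; simpa using hfq⟩
    obtain ⟨q', hq'⟩ := Option.isSome_iff_exists.mp hsome
    have hfq' : pvC l I q'.toNat = pvMi l (I : Int) := by
      have := List.find?_some hq'
      simpa using this
    rw [hq']
    simp only [hfq']
  · rw [if_neg hlt, if_neg hlt]

lemma pvAChar (l : List Char) :
    ((PySem.List.pyRange 0 ((l.length : Int) - 1) 1).foldl (fun st i =>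
        (PySem.List.pyRange (i + 1) (l.length : Int) 1).foldl (fun st j =>
          pvAInner l i j (PySem.List.pyRange st.2 ((l.length : Int) - i) 1) st) st)
        (([] : List Char), (0 : Int)))
    = if 0 < pvL l then
        (match (PySem.List.pyRange 0 ((l.length : Int) - 1) 1).find? (fun i => pvMi l i == pvL l) with
          | some i => ((l.drop i.toNat).take (pvL l), (pvL l : Int))
          | none => ([], 0))
      else ([], 0) := by
  have hstep : ∀ (e : List Char) (b : Nat) (i : Int),
      i ∈ PySem.List.pyRange 0 ((l.length : Int) - 1) 1 →
      ((PySem.List.pyRange (i + 1) (l.length : Int) 1).foldl (fun st j =>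
          pvAInner l i j (PySem.List.pyRange st.2 ((l.length : Int) - i) 1) st) (e, (b : Int)))
        = if b < pvMi l i then ((l.drop i.toNat).take (pvMi l i), (pvMi l i : Int)) else (e, (b : Int)) := by
    intro e b i hi
    rw [PySem.List.mem_pyRange_one] at hi
    have hieq : ((i.toNat : Int)) = i := Int.toNat_of_nonneg hi.1
    rw [← hieq]
    exact pvInnerFold_eq l i.toNat e b
  have h := pvRunMax (pvMi l) (fun i => (l.drop i.toNat).take (pvMi l i))
    (fun st i => (PySem.List.pyRange (i + 1) (l.length : Int) 1).foldl (fun st j =>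
        pvAInner l i j (PySem.List.pyRange st.2 ((l.length : Int) - i) 1) st) st)
    (PySem.List.pyRange 0 ((l.length : Int) - 1) 1)
    (by intro e b i hi; exact hstep e b i hi) [] 0
  have hL : pvL l = pvMaxF (pvMi l) (PySem.List.pyRange 0 ((l.length : Int) - 1) 1) := rfl
  rw [show (((0 : Nat) : Int)) = (0 : Int) from rfl] at h
  rw [h, ← hL]
  by_cases hlt : 0 < pvL l
  · rw [if_pos hlt, if_pos hlt]
    obtain ⟨q', hq'⟩ := Option.isSome_iff_exists.mp (by
      rw [List.find?_isSome]
      obtain ⟨q, hq, hfq⟩ := pvMaxF_achieved (pvMi l)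
        (PySem.List.pyRange 0 ((l.length : Int) - 1) 1) (by rw [← hL]; omega)
      exact ⟨q, hq, by rw [hL]; simpa using hfq⟩ :
      ((PySem.List.pyRange 0 ((l.length : Int) - 1) 1).find? (fun i => pvMi l i == pvL l)).isSome)
    have hfq' : pvMi l q' = pvL l := by
      have := List.find?_some hq'
      simpa using this
    rw [hq']
    simp only [hfq']
  · rw [if_neg hlt, if_neg hlt]

lemma pvBFindFirst_eq (S : String) (k : Int) (c : PySem.Dict String Int) :
    ∀ (ls : List Int), pvBFindFirst S k c ls
      = ls.find? (fun i => decide (c.getD (PySem.Str.slice S (some i) (some (i + k))) 0 > 1)) := by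
  intro ls
  induction ls with
  | nil => rfl
  | cons i rest ih =>
    simp only [pvBFindFirst, List.find?_cons]
    by_cases h : c.getD (PySem.Str.slice S (some i) (some (i + k))) 0 > 1
    · simp [h]
    · simp [h, ih]

lemma pvBCounts_getD (S : String) (n k : Int) (v : String) :
    ((PySem.List.pyRange 0 (n - k + 1) 1).foldl
      (fun (counts : PySem.Dict String Int) i =>
        counts.insert (PySem.Str.slice S (some i) (some (i + k)))
          (counts.getD (PySem.Str.slice S (some i) (some (i + k))) 0 + 1))
      PySem.Dict.empty).getD v 0
    = (((PySem.List.pyRange 0 (n - k + 1) 1).map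
        (fun i => PySem.Str.slice S (some i) (some (i + k)))).count v : Int) := by
  rw [← List.foldl_map (f := fun i => PySem.Str.slice S (some i) (some (i + k)))
      (g := fun (counts : PySem.Dict String Int) x => counts.insert x (counts.getD x 0 + 1))]
  rw [PySem.Dict.getD_foldl_insert_add_one]
  simp

lemma pv_subAt_toList (S : String) (i k : Int) (hi : 0 ≤ i) (hk : 0 ≤ k) :
    (PySem.Str.slice S (some i) (some (i + k))).toList = (S.toList.drop i.toNat).take k.toNat := by
  simp only [PySem.Str.toList_slice, PySem.Chars.slice_eq_listSlice]
  rw [PySem.List.slice_toNat _ hi (by omega)]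
  congr 1
  omega

lemma pv_one_lt_countP (l : List Int) (hnd : l.Nodup) (x : Int) (hx : x ∈ l)
    (p : Int → Bool) (hpx : p x = true) :
    1 < l.countP p ↔ ∃ y ∈ l, y ≠ x ∧ p y = true := by
  rw [List.countP_eq_length_filter]
  have hxf : x ∈ l.filter p := List.mem_filter.mpr ⟨hx, hpx⟩
  have hndf : (l.filter p).Nodup := hnd.filter p
  constructor
  · intro h
    match hf : l.filter p with
    | [] => rw [hf] at h; simp at h
    | [a] => rw [hf] at h; simp at h
    | a :: b :: t =>
      rw [hf] at hxf hndf
      have hab : a ≠ b := by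
        intro hEq
        exact (List.nodup_cons.mp hndf).1 (hEq ▸ List.mem_cons_self)
      rcases List.mem_cons.mp hxf with hxa | hxbt
      · refine ⟨b, ?_, by rw [← hxa] at hab; exact (Ne.symm hab), ?_⟩
        · have : b ∈ l.filter p := by rw [hf]; exact List.mem_cons_of_mem _ List.mem_cons_self
          exact (List.mem_filter.mp this).1
        · have : b ∈ l.filter p := by rw [hf]; exact List.mem_cons_of_mem _ List.mem_cons_self
          exact (List.mem_filter.mp this).2
      · refine ⟨a, ?_, ?_, ?_⟩
        · have : a ∈ l.filter p := by rw [hf]; exact List.mem_cons_self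
          exact (List.mem_filter.mp this).1
        · intro hEq
          exact (List.nodup_cons.mp hndf).1 (hEq ▸ hxbt)
        · have : a ∈ l.filter p := by rw [hf]; exact List.mem_cons_self
          exact (List.mem_filter.mp this).2
  · rintro ⟨y, hy, hyx, hpy⟩
    have hyf : y ∈ l.filter p := List.mem_filter.mpr ⟨hy, hpy⟩
    match hf : l.filter p with
    | [] => rw [hf] at hxf; cases hxf
    | [a] =>
      rw [hf] at hxf hyf
      simp at hxf hyf
      exact absurd (hyf.trans hxf.symm) hyx
    | a :: b :: t => simp

lemma pv_find?_pyRange_some (p : Int → Bool) :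
    ∀ (m : Nat) (a b : Int), (b - a).toNat = m → ∀ (x : Int),
    ((PySem.List.pyRange a b 1).find? p = some x ↔
      (a ≤ x ∧ x < b ∧ p x = true ∧ ∀ y : Int, a ≤ y → y < x → p y = false)) := by
  intro m
  induction m with
  | zero =>
    intro a b hm x
    rw [PySem.List.pyRange_one_eq_nil (by omega)]
    simp only [List.find?_nil]
    constructor
    · intro h; cases h
    · intro ⟨h1, h2, _⟩; omega
  | succ m ih =>
    intro a b hm x
    rw [PySem.List.pyRange_one_cons (by omega)]
    by_cases hpa : p a = true
    · rw [List.find?_cons_of_pos (h := hpa)]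
      constructor
      · intro h
        injection h with h
        subst h
        exact ⟨le_rfl, by omega, hpa, fun y h1 h2 => absurd h1 (by omega)⟩
      · intro ⟨h1, h2, hpx, hmin⟩
        have : x = a := by
          by_contra hne
          have : a < x := by omega
          have := hmin a le_rfl this
          rw [hpa] at this
          cases this
        rw [this]
    · rw [List.find?_cons_of_neg (h := by simp [hpa])]
      rw [ih (a + 1) b (by omega) x]
      have hpa' : p a = false := by
        cases h : p a
        · rfl
        · exact absurd h hpa
      constructor
      · intro ⟨h1, h2, hpx, hmin⟩
        refine ⟨by omega, h2, hpx, fun y hy1 hy2 => ?_⟩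
        by_cases hya : y = a
        · rw [hya]; exact hpa'
        · exact hmin y (by omega) hy2
      · intro ⟨h1, h2, hpx, hmin⟩
        have hxa : x ≠ a := by
          intro h
          rw [h] at hpx
          exact absurd hpx hpa
        exact ⟨by omega, h2, hpx, fun y hy1 hy2 => hmin y (by omega) hy2⟩

lemma pv_find?_pyRange_none (p : Int → Bool) (a b : Int) :
    ((PySem.List.pyRange a b 1).find? p = none ↔ ∀ y : Int, a ≤ y → y < b → p y = false) := by
  rw [List.find?_eq_none]
  constructor
  · intro h y h1 h2
    have := h y (PySem.List.mem_pyRange_one.mpr ⟨h1, h2⟩)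
    cases hp : p y
    · rfl
    · exact absurd hp this
  · intro h y hy
    rw [PySem.List.mem_pyRange_one] at hy
    simp [h y hy.1 hy.2]

lemma pv_k_le_C_iff (l : List Char) (i j k : Nat) (hij : i < j) (hj : j ≤ l.length) :
    k ≤ pvC l i j ↔ (j + k ≤ l.length ∧ (l.drop i).take k = (l.drop j).take k) := by
  rw [pvC, pv_le_cpl_iff]
  simp only [List.length_drop]
  constructor
  · rintro ⟨h1, h2, h3⟩
    exact ⟨by omega, h3⟩
  · rintro ⟨h1, h2⟩
    exact ⟨by omega, by omega, h2⟩

-- the input-level predicate 'position x has a later duplicate of length k'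
def pvPkI (S : String) (k x : Int) : Prop :=
  ∃ j : Nat, x.toNat < j ∧ j < S.toList.length ∧ k.toNat ≤ pvC S.toList x.toNat j

-- the scan predicate of B's dup_start, as the port computes it
def pvBPred (S : String) (n k : Int) (i : Int) : Bool :=
  decide (((PySem.List.pyRange 0 (n - k + 1) 1).foldl
      (fun (counts : PySem.Dict String Int) i =>
        counts.insert (PySem.Str.slice S (some i) (some (i + k)))
          (counts.getD (PySem.Str.slice S (some i) (some (i + k))) 0 + 1))
      PySem.Dict.empty).getD (PySem.Str.slice S (some i) (some (i + k))) 0 > 1)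

lemma pvBDupStart_eq_find? (S : String) (n k : Int) :
    pvBDupStart S n k = (PySem.List.pyRange 0 (n - k + 1) 1).find? (pvBPred S n k) := by
  simp only [pvBDupStart]
  rw [pvBFindFirst_eq]
  have h2 : (fun i => decide (((PySem.List.pyRange 0 (n - k + 1) 1).foldl
      (fun (counts : PySem.Dict String Int) i =>
        counts.insert (PySem.Str.slice S (some i) (some (i + k)))
          (counts.getD (PySem.Str.slice S (some i) (some (i + k))) 0 + 1))
      PySem.Dict.empty).getD (PySem.Str.slice S (some i) (some (i + k))) 0 > 1))
      = pvBPred S n k := by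
    funext i
    simp only [pvBPred]
  rw [h2]

lemma pvPkI_bounds (S : String) (k x : Int) (hk : 1 ≤ k) (hx : 0 ≤ x)
    (h : pvPkI S k x) : x < (S.toList.length : Int) - k + 1 := by
  obtain ⟨j, hj1, hj2, hj3⟩ := h
  have := pv_cpl_le_right (S.toList.drop x.toNat) (S.toList.drop j)
  rw [← pvC] at this
  simp only [List.length_drop] at this
  omega

lemma pvBPred_iff (S : String) (n k : Int) (hn : n = (S.toList.length : Int))
    (hk : 1 ≤ k) (i : Int) (hi0 : 0 ≤ i) (hin : i < n - k + 1) :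
    pvBPred S n k i = true ↔
      ∃ y : Int, 0 ≤ y ∧ y < n - k + 1 ∧ y ≠ i ∧
        (S.toList.drop y.toNat).take k.toNat = (S.toList.drop i.toNat).take k.toNat := by
  rw [pvBPred, decide_eq_true_iff, pvBCounts_getD]
  have hcount : (((PySem.List.pyRange 0 (n - k + 1) 1).map
      (fun i => PySem.Str.slice S (some i) (some (i + k)))).count
        (PySem.Str.slice S (some i) (some (i + k))))
      = (PySem.List.pyRange 0 (n - k + 1) 1).countP
          (fun t => PySem.Str.slice S (some t) (some (t + k)) == PySem.Str.slice S (some i) (some (i + k))) := by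
    rw [List.count_eq_countP, List.countP_map]
    rfl
  rw [gt_iff_lt]
  rw [show ((1 : Int) < (((PySem.List.pyRange 0 (n - k + 1) 1).map
      (fun i => PySem.Str.slice S (some i) (some (i + k)))).count
        (PySem.Str.slice S (some i) (some (i + k))) : Int)) ↔
      1 < (((PySem.List.pyRange 0 (n - k + 1) 1).map
      (fun i => PySem.Str.slice S (some i) (some (i + k)))).count
        (PySem.Str.slice S (some i) (some (i + k)))) from by push_cast; omega]
  rw [hcount]
  rw [pv_one_lt_countP _ (PySem.List.nodup_pyRange_one _ _) i
    (PySem.List.mem_pyRange_one.mpr ⟨hi0, hin⟩) _ (by simp)]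
  constructor
  · rintro ⟨y, hy, hyi, hpy⟩
    rw [PySem.List.mem_pyRange_one] at hy
    rw [beq_iff_eq, ← String.toList_inj,
      pv_subAt_toList S y k hy.1 (by omega), pv_subAt_toList S i k hi0 (by omega)] at hpy
    exact ⟨y, hy.1, hy.2, hyi, hpy⟩
  · rintro ⟨y, hy0, hyn, hyi, heq⟩
    refine ⟨y, PySem.List.mem_pyRange_one.mpr ⟨hy0, hyn⟩, hyi, ?_⟩
    rw [beq_iff_eq, ← String.toList_inj,
      pv_subAt_toList S y k hy0 (by omega), pv_subAt_toList S i k hi0 (by omega)]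
    exact heq

lemma pvBPred_of_PkI (S : String) (n k : Int) (hn : n = (S.toList.length : Int))
    (hk : 1 ≤ k) (x : Int) (hx : 0 ≤ x) (h : pvPkI S k x) : pvBPred S n k x = true := by
  have hxb : x < n - k + 1 := hn ▸ pvPkI_bounds S k x hk hx h
  obtain ⟨j, hj1, hj2, hj3⟩ := h
  have hkey := (pv_k_le_C_iff S.toList x.toNat j k.toNat hj1 (le_of_lt hj2)).mp hj3
  rw [pvBPred_iff S n k hn hk x hx hxb]
  refine ⟨(j : Int), by positivity, by omega, by omega, ?_⟩
  simp only [Int.toNat_natCast]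
  exact hkey.2.symm

lemma pvPkI_of_pred (S : String) (n k : Int) (hn : n = (S.toList.length : Int))
    (hk : 1 ≤ k) (x : Int) (hx0 : 0 ≤ x) (hxb : x < n - k + 1)
    (hp : pvBPred S n k x = true)
    (hmin : ∀ y : Int, 0 ≤ y → y < x → pvBPred S n k y = false) :
    pvPkI S k x := by
  rw [pvBPred_iff S n k hn hk x hx0 hxb] at hp
  obtain ⟨y, hy0, hyn, hyx, heq⟩ := hp
  rcases lt_or_gt_of_ne hyx with hlt | hgt
  · -- a partner strictly before x would itself have been flagged: contradiction
    exfalso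
    have hpy : pvBPred S n k y = true := by
      rw [pvBPred_iff S n k hn hk y hy0 hyn]
      exact ⟨x, hx0, hxb, by omega, heq.symm⟩
    have := hmin y hy0 hlt
    rw [hpy] at this
    cases this
  · refine ⟨y.toNat, by omega, by omega, ?_⟩
    rw [pv_k_le_C_iff S.toList x.toNat y.toNat k.toNat (by omega) (by omega)]
    exact ⟨by omega, heq.symm⟩

lemma pv_dupStart_some (S : String) (n k x : Int) (hn : n = (S.toList.length : Int))
    (hk : 1 ≤ k) (h : pvBDupStart S n k = some x) :
    0 ≤ x ∧ pvPkI S k x ∧ ∀ y : Int, 0 ≤ y → y < x → ¬ pvPkI S k y := by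
  rw [pvBDupStart_eq_find?] at h
  rw [pv_find?_pyRange_some (pvBPred S n k) ((n - k + 1) - 0).toNat 0 (n - k + 1) rfl] at h
  obtain ⟨h0, hb, hp, hmin⟩ := h
  refine ⟨h0, pvPkI_of_pred S n k hn hk x h0 hb hp hmin, ?_⟩
  intro y hy0 hyx hPk
  have := hmin y hy0 hyx
  rw [pvBPred_of_PkI S n k hn hk y hy0 hPk] at this
  cases this

lemma pv_dupStart_none (S : String) (n k : Int) (hn : n = (S.toList.length : Int))
    (hk : 1 ≤ k) (h : pvBDupStart S n k = none) :
    ∀ x : Int, 0 ≤ x → ¬ pvPkI S k x := by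
  rw [pvBDupStart_eq_find?, pv_find?_pyRange_none] at h
  intro x hx0 hPk
  have hxb : x < n - k + 1 := hn ▸ pvPkI_bounds S k x hk hx0 hPk
  have := h x hx0 hxb
  rw [pvBPred_of_PkI S n k hn hk x hx0 hPk] at this
  cases this

lemma pv_dupStart_mono (S : String) (n k k' : Int) (hn : n = (S.toList.length : Int))
    (hk : 1 ≤ k) (hkk : k ≤ k') (h : pvBDupStart S n k = none) :
    pvBDupStart S n k' = none := by
  cases hx : pvBDupStart S n k' with
  | none => rfl
  | some x =>
    exfalso
    obtain ⟨hx0, hPk, -⟩ := pv_dupStart_some S n k' x hn (by omega) hx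
    obtain ⟨j, hj1, hj2, hj3⟩ := hPk
    exact pv_dupStart_none S n k hn hk h x hx0 ⟨j, hj1, hj2, by omega⟩

lemma pv_exists_PkI_iff (S : String) (k : Int) (hk : 1 ≤ k) :
    (∃ x : Int, 0 ≤ x ∧ pvPkI S k x) ↔ k ≤ (pvL S.toList : Int) := by
  constructor
  · rintro ⟨x, hx0, j, hj1, hj2, hj3⟩
    have hjx : (x + 1 : Int) ≤ (j : Int) := by omega
    have hMi : k.toNat ≤ pvMi S.toList x := by
      have hmem : (j : Int) ∈ PySem.List.pyRange (x + 1) (S.toList.length : Int) 1 :=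
        PySem.List.mem_pyRange_one.mpr ⟨hjx, by exact_mod_cast hj2⟩
      have := pvMaxF_le (fun j : Int => pvC S.toList x.toNat j.toNat) _ hmem
      simpa [pvMi] using le_trans hj3 (by simpa using this)
    have hmem : x ∈ PySem.List.pyRange 0 ((S.toList.length : Int) - 1) 1 :=
      PySem.List.mem_pyRange_one.mpr ⟨hx0, by omega⟩
    have := pvMaxF_le (pvMi S.toList) _ hmem
    have : k.toNat ≤ pvL S.toList := le_trans hMi this
    omega
  · intro hkL
    have hL : pvL S.toList ≠ 0 := by omega
    obtain ⟨i, hi, hMi⟩ := pvMaxF_achieved (pvMi S.toList) _ hL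
    rw [PySem.List.mem_pyRange_one] at hi
    have hMiL : pvMi S.toList i = pvL S.toList := hMi
    have hMidef : pvMi S.toList i = pvMaxF (fun j : Int => pvC S.toList i.toNat j.toNat)
        (PySem.List.pyRange (i + 1) (S.toList.length : Int) 1) := rfl
    obtain ⟨j, hj, hCj⟩ := pvMaxF_achieved (fun j : Int => pvC S.toList i.toNat j.toNat)
      (PySem.List.pyRange (i + 1) (S.toList.length : Int) 1) (hMidef ▸ (by omega : pvMi S.toList i ≠ 0))
    rw [PySem.List.mem_pyRange_one] at hj
    have hCL : pvC S.toList i.toNat j.toNat = pvL S.toList := by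
      rw [hCj, ← hMidef, hMiL]
    refine ⟨i, hi.1, j.toNat, ?_, ?_, ?_⟩
    · omega
    · omega
    · rw [hCL]; omega

lemma pvBSearch_eq (S : String) (n : Int) (hn : n = (S.toList.length : Int)) :
    ∀ (fuel : Nat) (lo hi bk bi : Int),
    1 ≤ lo → bk = lo - 1 → (hi - lo + 1).toNat ≤ fuel →
    (∀ k : Int, hi < k → 1 ≤ k → pvBDupStart S n k = none) →
    (bk = 0 → bi = 0) →
    (1 ≤ bk → pvBDupStart S n bk = some bi) →
    (pvBSearch S n fuel lo hi bk bi).1 = (pvL S.toList : Int) ∧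
    (pvL S.toList = 0 → (pvBSearch S n fuel lo hi bk bi).2 = 0) ∧
    (1 ≤ pvL S.toList →
      pvBDupStart S n (pvL S.toList : Int) = some (pvBSearch S n fuel lo hi bk bi).2) := by
  have hterm : ∀ (bk bi : Int), 1 ≤ bk + 1 →
      (∀ k : Int, bk < k → 1 ≤ k → pvBDupStart S n k = none) →
      (bk = 0 → bi = 0) →
      (1 ≤ bk → pvBDupStart S n bk = some bi) →
      (bk = (pvL S.toList : Int) ∧ (pvL S.toList = 0 → bi = 0) ∧
        (1 ≤ pvL S.toList → pvBDupStart S n (pvL S.toList : Int) = some bi)) := by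
    intro bk bi hlo hnone h0 hsome
    have hbk0 : 0 ≤ bk := by omega
    have hL : bk = (pvL S.toList : Int) := by
      by_cases hb : 1 ≤ bk
      · have h1 := pv_dupStart_some S n bk bi hn hb (hsome hb)
        have hble : bk ≤ (pvL S.toList : Int) :=
          (pv_exists_PkI_iff S bk hb).mp ⟨bi, h1.1, h1.2.1⟩
        by_contra hne
        have hgt : bk < (pvL S.toList : Int) := by omega
        obtain ⟨x, hx0, hPk⟩ := (pv_exists_PkI_iff S (pvL S.toList : Int) (by omega)).mpr le_rfl
        exact pv_dupStart_none S n (pvL S.toList : Int) hn (by omega)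
          (hnone _ hgt (by omega)) x hx0 hPk
      · have hbk : bk = 0 := by omega
        by_contra hne
        have hgt : 1 ≤ (pvL S.toList : Int) := by omega
        obtain ⟨x, hx0, hPk⟩ := (pv_exists_PkI_iff S (pvL S.toList : Int) hgt).mpr le_rfl
        exact pv_dupStart_none S n (pvL S.toList : Int) hn hgt
          (hnone _ (by omega) (by omega)) x hx0 hPk
    refine ⟨hL, fun h => h0 (by omega), fun h => ?_⟩
    rw [← hL]
    exact hsome (by omega)
  intro fuel
  induction fuel with
  | zero =>
    intro lo hi bk bi hlo hbk hf hnone h0 hsome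
    simp only [pvBSearch]
    exact hterm bk bi (by omega) (fun k hk1 hk2 => hnone k (by omega) hk2) h0 hsome
  | succ fuel ih =>
    intro lo hi bk bi hlo hbk hf hnone h0 hsome
    simp only [pvBSearch]
    by_cases hcmp : lo ≤ hi
    · rw [if_pos hcmp]
      obtain ⟨hm1, hm2⟩ := PySem.Int.floordiv_two_mid_bounds hcmp
      cases hds : pvBDupStart S n (PySem.Int.floordiv (lo + hi) 2) with
      | some i =>
        exact ih (PySem.Int.floordiv (lo + hi) 2 + 1) hi (PySem.Int.floordiv (lo + hi) 2) i
          (by omega) (by omega) (by omega) hnone (by omega)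
          (fun _ => hds)
      | none =>
        refine ih lo (PySem.Int.floordiv (lo + hi) 2 - 1) bk bi hlo hbk (by omega)
          (fun k hk1 hk2 => ?_) h0 hsome
        by_cases hkhi : hi < k
        · exact hnone k hkhi hk2
        · exact pv_dupStart_mono S n (PySem.Int.floordiv (lo + hi) 2) k hn (by omega)
            (by omega) hds
    · rw [if_neg hcmp]
      exact hterm bk bi (by omega) (fun k hk1 hk2 => hnone k (by omega) hk2) h0 hsome

lemma pv_PkI_iff_Mi (S : String) (k : Int) (hk : 1 ≤ k) (i : Int) (hi0 : 0 ≤ i) :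
    pvPkI S k i ↔ k.toNat ≤ pvMi S.toList i := by
  constructor
  · rintro ⟨j, hj1, hj2, hj3⟩
    have hmem : (j : Int) ∈ PySem.List.pyRange (i + 1) (S.toList.length : Int) 1 :=
      PySem.List.mem_pyRange_one.mpr ⟨by omega, by exact_mod_cast hj2⟩
    have := pvMaxF_le (fun j : Int => pvC S.toList i.toNat j.toNat) _ hmem
    exact le_trans hj3 (by simpa using this)
  · intro hle
    have hMidef : pvMi S.toList i = pvMaxF (fun j : Int => pvC S.toList i.toNat j.toNat)
        (PySem.List.pyRange (i + 1) (S.toList.length : Int) 1) := rfl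
    obtain ⟨j, hj, hCj⟩ := pvMaxF_achieved (fun j : Int => pvC S.toList i.toNat j.toNat)
      (PySem.List.pyRange (i + 1) (S.toList.length : Int) 1)
      (hMidef ▸ (by omega : pvMi S.toList i ≠ 0))
    rw [PySem.List.mem_pyRange_one] at hj
    refine ⟨j.toNat, ?_, ?_, ?_⟩
    · omega
    · omega
    · rw [hCj, ← hMidef]; omega


-- A raises nothing: for k > n-1 there is no duplicate, so dup_start is none
lemma pv_dupStart_big (S : String) (k : Int) (hk1 : (S.toList.length : Int) - 1 < k)
    (hk2 : 1 ≤ k) : pvBDupStart S (S.toList.length : Int) k = none := by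
  cases hds : pvBDupStart S (S.toList.length : Int) k with
  | none => rfl
  | some x =>
    exfalso
    obtain ⟨hx0, ⟨j, hj1, hj2, hj3⟩, -⟩ :=
      pv_dupStart_some S (S.toList.length : Int) k x rfl hk2 hds
    have := pv_cpl_le_right (S.toList.drop x.toNat) (S.toList.drop j)
    rw [← pvC] at this
    simp only [List.length_drop] at this
    omega

-- ===== VERDICT (by name: the statement is the Claim_ definition above) =====
theorem longestDupSubstring_easy_long_sol_spec : Claim_equal_longestDupSubstring_easy_long_sol := by
  intro S _
  unfold Spec_longestDupSubstring_easy_long_sol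
  simp only [longestDupSubstring_easy_long_sol, longestDupSubstring_easy_long_sol_alt]
  rw [pvAChar S.toList]
  obtain ⟨hr1, hr20, hr2s⟩ := pvBSearch_eq S (S.toList.length : Int) rfl
    (((S.toList.length : Int)) + 2).toNat 1 ((S.toList.length : Int) - 1) 0 0
    (by omega) (by omega) (by omega)
    (fun k hk1 hk2 => pv_dupStart_big S k hk1 hk2)
    (fun _ => rfl) (fun h => absurd h (by omega))
  by_cases hL : pvL S.toList = 0
  · rw [if_neg (by omega)]
    rw [← String.toList_inj]
    rw [hr20 hL, hr1, hL]
    rw [pv_subAt_toList S 0 ((0 : Nat) : Int) le_rfl (by omega)]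
    simp
  · have hL1 : 1 ≤ pvL S.toList := by omega
    have hds := hr2s hL1
    obtain ⟨hx0, hPk, hmin⟩ :=
      pv_dupStart_some S (S.toList.length : Int) ((pvL S.toList : Int))
        (pvBSearch S (S.toList.length : Int) (((S.toList.length : Int)) + 2).toNat 1
          ((S.toList.length : Int) - 1) 0 0).2 rfl (by omega) hds
    rw [if_pos (by omega : 0 < pvL S.toList)]
    -- the outer find? of A succeeds
    obtain ⟨q, hq, hfq⟩ := pvMaxF_achieved (pvMi S.toList)
      (PySem.List.pyRange 0 ((S.toList.length : Int) - 1) 1) (by exact hL)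
    obtain ⟨q', hq'⟩ := Option.isSome_iff_exists.mp (by
      rw [List.find?_isSome]
      exact ⟨q, hq, by simpa using hfq⟩ :
      ((PySem.List.pyRange 0 ((S.toList.length : Int) - 1) 1).find?
        (fun i => pvMi S.toList i == pvL S.toList)).isSome)
    rw [hq']
    obtain ⟨hq0, hqb, hqp, hqmin⟩ :=
      (pv_find?_pyRange_some (fun i => pvMi S.toList i == pvL S.toList)
        (((S.toList.length : Int) - 1) - 0).toNat 0 ((S.toList.length : Int) - 1) rfl q').mp hq'
    have hqMi : pvMi S.toList q' = pvL S.toList := by simpa using hqp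
    -- the two first indices coincide
    have hqr : q' = (pvBSearch S (S.toList.length : Int) (((S.toList.length : Int)) + 2).toNat 1
        ((S.toList.length : Int) - 1) 0 0).2 := by
      rcases lt_trichotomy q' (pvBSearch S (S.toList.length : Int)
          (((S.toList.length : Int)) + 2).toNat 1 ((S.toList.length : Int) - 1) 0 0).2 with hlt | heq | hgt
      · exfalso
        refine hmin q' hq0 hlt ?_
        exact (pv_PkI_iff_Mi S ((pvL S.toList : Int)) (by omega) q' hq0).mpr (by simp [hqMi])
      · exact heq
      · exfalso
        have hMle : (pvL S.toList) ≤ pvMi S.toList (pvBSearch S (S.toList.length : Int)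
            (((S.toList.length : Int)) + 2).toNat 1 ((S.toList.length : Int) - 1) 0 0).2 := by
          have := (pv_PkI_iff_Mi S ((pvL S.toList : Int)) (by omega) _ hx0).mp hPk
          simpa using this
        obtain ⟨j, hj1, hj2, -⟩ := hPk
        have hmem : (pvBSearch S (S.toList.length : Int) (((S.toList.length : Int)) + 2).toNat 1
            ((S.toList.length : Int) - 1) 0 0).2 ∈
            PySem.List.pyRange 0 ((S.toList.length : Int) - 1) 1 :=
          PySem.List.mem_pyRange_one.mpr ⟨hx0, by omega⟩
        have hMge : pvMi S.toList (pvBSearch S (S.toList.length : Int)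
            (((S.toList.length : Int)) + 2).toNat 1 ((S.toList.length : Int) - 1) 0 0).2
            ≤ pvL S.toList := pvMaxF_le (pvMi S.toList) _ hmem
        have := hqmin _ hx0 hgt
        simp at this
        exact this (le_antisymm hMge hMle)
    rw [← String.toList_inj]
    rw [hr1]
    rw [pv_subAt_toList S _ ((pvL S.toList : Nat) : Int) hx0 (by omega)]
    simp [hqr]
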